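-- pv_equiv track=rewrite | github.com/Kaleswarydon/AdventOfCode | 2023/Day22/puzzle22.py | get_dims_from_dict
-- ===== SOURCE A (Python) =====
-- def get_dims_from_dict(prep): #get grid dimensions from input data
--     x_max = 0
--     y_max = 0
--     z_max = 0
--     for i in prep.keys():
--         for coord in prep.get(i):
--             if coord[0] > x_max:
--                 x_max = coord[0]
--             if coord[1] > y_max:
--                 y_max = coord[1]
--             if coord[2] > z_max:
--                 z_max = coord[2]
--     return (x_max, y_max, z_max)
-- ===== SOURCE B (Python) =====
-- def get_dims_from_dict(prep): #get grid dimensions from input data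
--     coords = [c for i in prep for c in prep.get(i)]
--     xs = sorted([0] + [c[0] for c in coords], reverse=True)
--     ys = sorted([0] + [c[1] for c in coords], reverse=True)
--     zs = sorted([0] + [c[2] for c in coords], reverse=True)
--     return (xs[0], ys[0], zs[0])
-- ===== Notes on version B (the rewrite author's own statement) =====
-- stated objective: alternative
-- what changed: Replaces A's single running-maximum loop with three conditional accumulators by a sort-based selection: each axis list (with a 0 sentinel prepended) is sorted descending and its first element taken.
import Mathlib
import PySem

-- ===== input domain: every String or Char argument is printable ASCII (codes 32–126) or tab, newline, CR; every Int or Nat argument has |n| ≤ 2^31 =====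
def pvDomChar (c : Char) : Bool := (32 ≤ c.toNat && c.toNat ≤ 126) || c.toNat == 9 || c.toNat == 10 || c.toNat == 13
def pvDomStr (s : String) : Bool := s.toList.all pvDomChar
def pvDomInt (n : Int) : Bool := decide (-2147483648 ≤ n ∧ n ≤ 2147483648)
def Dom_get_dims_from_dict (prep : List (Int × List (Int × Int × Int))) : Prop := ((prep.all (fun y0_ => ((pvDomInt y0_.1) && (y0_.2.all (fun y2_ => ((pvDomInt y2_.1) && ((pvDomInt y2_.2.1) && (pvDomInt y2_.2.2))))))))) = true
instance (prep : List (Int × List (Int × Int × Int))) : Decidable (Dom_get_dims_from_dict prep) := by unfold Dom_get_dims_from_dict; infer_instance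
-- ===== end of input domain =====

-- B replaces A's single running-maximum loop by sort-based selection: each axis list
-- (with a 0 sentinel prepended) is sorted descending and its first element taken (alternative algorithm, not faster).


-- ===== PORT A =====
-- for i in prep.keys(): for coord in prep.get(i): three conditional updates of (x_max, y_max, z_max)
def get_dims_from_dict (prep : List (Int × List (Int × Int × Int))) : Int × Int × Int :=
  let d := PySem.Dict.mk prep
  d.keys.foldl
    (fun s i =>
      (d.getD i []).foldl
        (fun (s : Int × Int × Int) coord =>
          let x_max := if coord.1 > s.1 then coord.1 else s.1
          let y_max := if coord.2.1 > s.2.1 then coord.2.1 else s.2.1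
          let z_max := if coord.2.2 > s.2.2 then coord.2.2 else s.2.2
          (x_max, y_max, z_max))
        s)
    (0, 0, 0)

-- ===== PORT B =====
-- coords = [c for i in prep for c in prep.get(i)]; per axis, sorted([0] + …, reverse=True)[0].
-- The sorted list is nonempty (it contains the sentinel 0), so xs[0] never raises; the
-- '.getD 0' only totalises pyGet? and is never taken.
def get_dims_from_dict_alt (prep : List (Int × List (Int × Int × Int))) : Int × Int × Int :=
  let d := PySem.Dict.mk prep
  let coords := d.keys.flatMap (fun i => d.getD i [])
  let xs := PySem.List.sorted ((0 : Int) :: coords.map (fun c => c.1)) (fun x => x) true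
  let ys := PySem.List.sorted ((0 : Int) :: coords.map (fun c => c.2.1)) (fun x => x) true
  let zs := PySem.List.sorted ((0 : Int) :: coords.map (fun c => c.2.2)) (fun x => x) true
  ((PySem.List.pyGet? xs 0).getD 0, (PySem.List.pyGet? ys 0).getD 0, (PySem.List.pyGet? zs 0).getD 0)

-- ===== PRECONDITION & SPEC =====
def Spec_get_dims_from_dict (prep : List (Int × List (Int × Int × Int))) (out : Int × Int × Int) : Prop := out = get_dims_from_dict_alt prep
instance (prep : List (Int × List (Int × Int × Int))) (out : Int × Int × Int) : Decidable (Spec_get_dims_from_dict prep out) := by unfold Spec_get_dims_from_dict; infer_instance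

-- ===== CLAIM (what is proved, stated in full; the proofs are below) =====
def Claim_equal_get_dims_from_dict : Prop := ∀ (prep : List (Int × List (Int × Int × Int))), Dom_get_dims_from_dict prep → Spec_get_dims_from_dict prep (get_dims_from_dict prep)

-- ===== LEMMAS AND PROOFS =====

-- A's nested loop over keys is the fold of its body over the flattened coordinate list.
theorem foldl_nested_eq_flatMap {α β γ : Type} (ks : List α) (g : α → List β)
    (f : γ → β → γ) (init : γ) :
    ks.foldl (fun s i => (g i).foldl f s) init = (ks.flatMap g).foldl f init := by
  induction ks generalizing init with
  | nil => rfl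
  | cons k t ih => simp [List.flatMap_cons, List.foldl_append, ih]

-- A's three-conditional step, folded over any coordinate list, computes the three axis maxima.
theorem step3_eq_axis_max (coords : List (Int × Int × Int)) (x y z : Int) :
    coords.foldl
      (fun (s : Int × Int × Int) coord =>
        let x_max := if coord.1 > s.1 then coord.1 else s.1
        let y_max := if coord.2.1 > s.2.1 then coord.2.1 else s.2.1
        let z_max := if coord.2.2 > s.2.2 then coord.2.2 else s.2.2
        (x_max, y_max, z_max))
      (x, y, z)
    = ((coords.map (fun c => c.1)).foldl max x,
       (coords.map (fun c => c.2.1)).foldl max y,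
       (coords.map (fun c => c.2.2)).foldl max z) := by
  induction coords generalizing x y z with
  | nil => rfl
  | cons c t ih =>
      simp only [List.foldl_cons, List.map_cons, ih]
      congr 1 <;> [skip; congr 1] <;>
        · congr 1
          simp only [max_def]
          split_ifs <;> omega

-- The head of the descending sort of a :: l is the running maximum of l started at a.
theorem head_sorted_rev_eq_foldl_max (a : Int) (l : List Int) :
    (PySem.List.pyGet? (PySem.List.sorted (a :: l) (fun x => x) true) 0).getD 0
      = l.foldl max a := by
  cases h : PySem.List.sorted (a :: l) (fun x => x) true with
  | nil =>
      have : (a :: l : List Int) = [] := (PySem.List.sorted_eq_nil_iff _ _ _).mp h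
      simp at this
  | cons m t =>
      have hge : ∀ y ∈ a :: l, y ≤ m := by
        have := PySem.List.key_head_sorted_rev_ge (xs := a :: l) (key := fun x => x) h
        simpa using this
      have hmem : m ∈ a :: l := by
        have : m ∈ PySem.List.sorted (a :: l) (fun x => x) true := by
          rw [h]; exact List.mem_cons_self
        exact (PySem.List.mem_sorted _ _ _ _).mp this
      have hfm : l.foldl max a ∈ a :: l := by
        rcases PySem.List.foldl_max_mem l a with h1 | h1
        · rw [h1]; exact List.mem_cons_self
        · exact List.mem_cons_of_mem _ h1
      have h1 : l.foldl max a ≤ m := hge _ hfm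
      have h2 : m ≤ l.foldl max a := by
        rcases List.mem_cons.mp hmem with hm | hm
        · rw [hm]; exact (PySem.List.le_foldl_max l a).1
        · exact (PySem.List.le_foldl_max l a).2 _ hm
      simp [PySem.List.pyGet?, PySem.List.pyIdx?]
      omega

-- ===== VERDICT (by name: the statement is the Claim_ definition above) =====
theorem get_dims_from_dict_spec : Claim_equal_get_dims_from_dict := by
  intro prep _
  unfold Spec_get_dims_from_dict get_dims_from_dict get_dims_from_dict_alt
  rw [foldl_nested_eq_flatMap, step3_eq_axis_max]
  simp only [head_sorted_rev_eq_foldl_max]
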